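-- pv_equiv track=rewrite | github.com/tianman450-oss/qq-group-bot | src/plugins/draw_plugin/__init__.py | _match_choice
-- ===== SOURCE A (Python) =====
-- from typing import Any, Dict, List, Optional, Set, Tuple
--
-- def _normalize_choice(text: str) -> str:
--     return " ".join(text.strip().split())
--
-- def _match_choice(text: str, choices: List[str]) -> Optional[str]:
--     target = _normalize_choice(text)
--     if not target:
--         return None
--     for choice in choices:
--         if choice == target:
--             return choice
--
--     target_lower = target.lower()
--     for choice in choices:
--         if choice.lower() == target_lower:
--             return choice
--
--     contains_matches = [choice for choice in choices if target_lower in choice.lower()]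
--     if len(contains_matches) == 1:
--         return contains_matches[0]
--     return None
-- ===== SOURCE B (Python) =====
-- from typing import List, Optional
--
-- def _match_choice(text: str, choices: List[str]) -> Optional[str]:
--     target = " ".join(text.strip().split())
--     if not target:
--         return None
--     target_lower = target.lower()
--     exact: Optional[str] = None
--     ci: Optional[str] = None
--     contains: List[str] = []
--     for choice in choices:
--         low = choice.lower()
--         if exact is None and choice == target:
--             exact = choice
--         if ci is None and low == target_lower:
--             ci = choice
--         if target_lower in low:
--             contains.append(choice)
--     if exact is not None:
--         return exact
--     if ci is not None:
--         return ci
--     return contains[0] if len(contains) == 1 else None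
-- ===== Notes on version B (the rewrite author's own statement) =====
-- stated objective: alternative
-- what changed: Replaces A's three separate scans over choices (exact pass, a second lowercase pass, then a containment comprehension) with a single loop that maintains the first exact match, the first case-insensitive match and the containment list at once.
import Mathlib
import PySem

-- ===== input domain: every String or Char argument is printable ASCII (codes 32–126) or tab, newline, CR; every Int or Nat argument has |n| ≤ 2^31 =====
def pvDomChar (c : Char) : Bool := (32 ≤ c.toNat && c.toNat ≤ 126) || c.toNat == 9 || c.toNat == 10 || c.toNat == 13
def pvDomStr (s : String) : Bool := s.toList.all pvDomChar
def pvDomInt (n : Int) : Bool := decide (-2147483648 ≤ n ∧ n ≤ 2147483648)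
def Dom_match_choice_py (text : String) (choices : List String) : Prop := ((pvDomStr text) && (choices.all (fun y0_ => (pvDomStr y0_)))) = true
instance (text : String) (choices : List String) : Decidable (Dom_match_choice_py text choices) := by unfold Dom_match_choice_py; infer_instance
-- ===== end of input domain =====

-- B replaces A's three scans over `choices` with one loop maintaining the first exact match,
-- the first case-insensitive match and the containment list (alternative decomposition, same cost).


-- ===== PORT A =====
-- helper: _normalize_choice(text) = " ".join(text.strip().split())
def normalize_choice_py (text : String) : String :=
  PySem.Str.join " " (PySem.Str.split₀ (PySem.Str.strip text))

def match_choice_py (text : String) (choices : List String) : Option String :=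
  let target := normalize_choice_py text
  if target = "" then none
  else
    -- first loop: exact match
    match choices.find? (fun choice => choice == target) with
    | some choice => some choice
    | none =>
      let target_lower := PySem.Str.lower target
      -- second loop: case-insensitive match
      match choices.find? (fun choice => PySem.Str.lower choice == target_lower) with
      | some choice => some choice
      | none =>
        -- comprehension: containment matches
        let contains_matches := choices.filter (fun choice => PySem.Str.isIn target_lower (PySem.Str.lower choice))
        if contains_matches.length = 1 then contains_matches.head? else none

-- ===== PORT B =====
-- one pass: state = (first exact match, first case-insensitive match, containment list)
def match_choice_step (target target_lower : String)
    (st : Option String × Option String × List String) (choice : String) :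
    Option String × Option String × List String :=
  let low := PySem.Str.lower choice
  let e := if st.1.isNone && (choice == target) then some choice else st.1
  let c := if st.2.1.isNone && (low == target_lower) then some choice else st.2.1
  let l := if PySem.Str.isIn target_lower low then st.2.2 ++ [choice] else st.2.2
  (e, c, l)

def match_choice_py_alt (text : String) (choices : List String) : Option String :=
  let target := PySem.Str.join " " (PySem.Str.split₀ (PySem.Str.strip text))
  if target = "" then none
  else
    let target_lower := PySem.Str.lower target
    let st := choices.foldl (match_choice_step target target_lower) (none, none, [])
    match st.1 with
    | some e => some e
    | none =>
      match st.2.1 with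
      | some c => some c
      | none => if st.2.2.length = 1 then st.2.2.head? else none

-- ===== PRECONDITION & SPEC =====
def Spec_match_choice_py (text : String) (choices : List String) (out : Option String) : Prop := out = match_choice_py_alt text choices
instance (text : String) (choices : List String) (out : Option String) : Decidable (Spec_match_choice_py text choices out) := by unfold Spec_match_choice_py; infer_instance

-- ===== CLAIM (what is proved, stated in full; the proofs are below) =====
def Claim_equal_match_choice_py : Prop := ∀ (text : String) (choices : List String), Dom_match_choice_py text choices → Spec_match_choice_py text choices (match_choice_py text choices)

-- ===== LEMMAS AND PROOFS =====

-- the fold's state is the pair of first matches plus the accumulated containment list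
theorem match_choice_foldl_char (target target_lower : String) (choices : List String)
    (e c : Option String) (l : List String) :
    choices.foldl (match_choice_step target target_lower) (e, c, l) =
      ((e.or (choices.find? (fun choice => choice == target))),
       (c.or (choices.find? (fun choice => PySem.Str.lower choice == target_lower))),
       l ++ choices.filter (fun choice => PySem.Str.isIn target_lower (PySem.Str.lower choice))) := by
  induction choices generalizing e c l with
  | nil => simp
  | cons x xs ih =>
    simp only [List.foldl_cons, match_choice_step, List.find?_cons, List.filter_cons]
    cases e <;> cases c <;>
      by_cases hx : (x == target) = true <;>
      by_cases hc : (PySem.Str.lower x == target_lower) = true <;>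
      by_cases hi : PySem.Chars.isIn target_lower.toList (PySem.Chars.lower x.toList) = true <;>
      simp [hx, hc, hi, ih]

-- ===== VERDICT (by name: the statement is the Claim_ definition above) =====
theorem match_choice_py_spec : Claim_equal_match_choice_py := by
  intro text choices _
  unfold Spec_match_choice_py match_choice_py match_choice_py_alt normalize_choice_py
  by_cases ht : PySem.Str.join " " (PySem.Str.split₀ (PySem.Str.strip text)) = ""
  · simp [ht]
  · simp only [match_choice_foldl_char, List.nil_append, if_neg ht]
    cases h1 : List.find? (fun choice => choice == PySem.Str.join " " (PySem.Str.split₀ (PySem.Str.strip text))) choices <;>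
      cases h2 : List.find? (fun choice => PySem.Str.lower choice == PySem.Str.lower (PySem.Str.join " " (PySem.Str.split₀ (PySem.Str.strip text)))) choices <;>
        simp_all
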